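-- pv_equiv track=rewrite | github.com/mannyrayner/C-LARA | clara_app/clara_phonetic_text.py | transfer_casing_to_aligned_word1
-- ===== SOURCE A (Python) =====
-- def transfer_casing_to_aligned_word1(word, aligned_word):
--     aligned_word1 = ''
--     for letter in aligned_word:
--         if letter == '|':
--             aligned_word1 += letter
--         else:
--             letter1 = word[0]
--             aligned_word1 += letter1
--             word = word[1:]
--     return aligned_word1
-- ===== SOURCE B (Python) =====
-- def transfer_casing_to_aligned_word1(word, aligned_word):
--     segments = aligned_word.split('|')
--     rebuilt_segments = []
--     pos = 0
--     for segment in segments: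
--         chars = []
--         for _ in segment:
--             chars.append(word[pos])
--             pos += 1
--         rebuilt_segments.append(''.join(chars))
--     return '|'.join(rebuilt_segments)
-- ===== Notes on version B (the rewrite author's own statement) =====
-- stated objective: faster
-- what changed: B splits aligned_word on '|' first and rebuilds each segment from word via a running position index joined back with '|', instead of A's single char loop that re-slices word (word = word[1:]) at every non-separator character.
import Mathlib
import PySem

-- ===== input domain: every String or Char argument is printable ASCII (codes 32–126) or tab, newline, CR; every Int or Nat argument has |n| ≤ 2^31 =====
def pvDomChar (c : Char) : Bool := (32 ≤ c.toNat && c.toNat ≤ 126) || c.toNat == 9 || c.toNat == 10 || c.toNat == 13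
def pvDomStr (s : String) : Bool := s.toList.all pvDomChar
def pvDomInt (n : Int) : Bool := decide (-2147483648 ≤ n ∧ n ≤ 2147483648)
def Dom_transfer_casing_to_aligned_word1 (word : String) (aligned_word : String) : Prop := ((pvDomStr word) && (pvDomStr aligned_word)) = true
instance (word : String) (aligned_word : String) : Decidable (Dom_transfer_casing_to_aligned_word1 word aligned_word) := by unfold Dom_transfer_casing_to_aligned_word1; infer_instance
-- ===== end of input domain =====

-- B rebuilds the word through split('|') / per-segment fill with a position index / '|'.join,
-- instead of A's single char loop that re-slices word at every non-separator character (alternative decomposition).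


-- ===== PORT A =====
-- A's loop over aligned_word; state = (remaining word, accumulated output).
-- word[0] on an empty word is IndexError (pyGet? = none): excluded by Pre_, the port stops there.
def pvGoA : List Char → List Char → List Char → List Char
  | _, acc, [] => acc
  | w, acc, c :: rest =>
    if c = '|' then pvGoA w (acc ++ [c]) rest
    else
      match PySem.List.pyGet? w 0 with
      | none => acc   -- Python raises IndexError here (outside Pre_)
      | some c1 => pvGoA (PySem.List.slice w (some 1) none) (acc ++ [c1]) rest

def transfer_casing_to_aligned_word1 (word : String) (aligned_word : String) : String :=
  String.ofList (pvGoA word.toList [] aligned_word.toList)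

-- ===== PORT B =====
-- the inner 'for _ in segment: chars.append(word[pos]); pos += 1' loop
def pvFillSeg (w : List Char) (pos : Nat) : List Char → List Char × Nat
  | [] => ([], pos)
  | _ :: rest =>
    match PySem.List.pyGet? w (pos : Int) with
    | none => ([], pos)   -- Python raises IndexError here (outside Pre_)
    | some c =>
      let (cs, p) := pvFillSeg w (pos + 1) rest
      (c :: cs, p)

-- the outer 'for segment in segments' loop, collecting the rebuilt segments
def pvGoB (w : List Char) (pos : Nat) : List (List Char) → List (List Char)
  | [] => []
  | seg :: rest =>
    let (cs, p) := pvFillSeg w pos seg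
    cs :: pvGoB w p rest

def transfer_casing_to_aligned_word1_alt (word : String) (aligned_word : String) : String :=
  String.ofList
    (PySem.Chars.join ['|']
      (pvGoB word.toList 0 (PySem.Chars.splitOn aligned_word.toList ['|'])))

-- ===== PRECONDITION & SPEC =====
-- Pre_ excludes exactly the inputs on which Python A raises IndexError: aligned_word
-- containing more non-'|' characters than word has characters (B raises there too).
def Pre_transfer_casing_to_aligned_word1 (word : String) (aligned_word : String) : Prop :=
  (aligned_word.toList.filter (fun c => c ≠ '|')).length ≤ word.toList.length
instance (word : String) (aligned_word : String) : Decidable (Pre_transfer_casing_to_aligned_word1 word aligned_word) := by unfold Pre_transfer_casing_to_aligned_word1; infer_instance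

def pvWitness_transfer_casing_to_aligned_word1 : String × String := ("abc", "ab|c")

def Spec_transfer_casing_to_aligned_word1 (word : String) (aligned_word : String) (out : String) : Prop := out = transfer_casing_to_aligned_word1_alt word aligned_word
instance (word : String) (aligned_word : String) (out : String) : Decidable (Spec_transfer_casing_to_aligned_word1 word aligned_word out) := by unfold Spec_transfer_casing_to_aligned_word1; infer_instance

-- ===== CLAIM (what is proved, stated in full; the proofs are below) =====
def Claim_equal_transfer_casing_to_aligned_word1 : Prop := ∀ (word : String) (aligned_word : String), Dom_transfer_casing_to_aligned_word1 word aligned_word → Pre_transfer_casing_to_aligned_word1 word aligned_word → Spec_transfer_casing_to_aligned_word1 word aligned_word (transfer_casing_to_aligned_word1 word aligned_word)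

-- ===== LEMMAS AND PROOFS =====

-- common reference function: consume one char of w per non-'|' char of the template
def pvRep : List Char → List Char → List Char
  | _, [] => []
  | w, c :: cs =>
    if c = '|' then '|' :: pvRep w cs
    else match w with
      | [] => []
      | x :: xs => x :: pvRep xs cs

-- structural single-char split (what splitOn al ['|'] computes)
def pvSplit : List Char → List (List Char)
  | [] => [[]]
  | c :: cs =>
    if c = '|' then [] :: pvSplit cs
    else match pvSplit cs with
      | [] => [[c]]
      | s :: ss => (c :: s) :: ss

theorem pvSplit_ne_nil (l : List Char) : pvSplit l ≠ [] := by
  cases l with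
  | nil => simp [pvSplit]
  | cons c cs =>
    simp only [pvSplit]
    split
    · simp
    · cases h : pvSplit cs <;> simp

theorem pvSplit_cons_bar (cs : List Char) : pvSplit ('|' :: cs) = [] :: pvSplit cs := by
  simp [pvSplit]

theorem pvGo_eq (fuel : Nat) (l cur : List Char) (acc : List (List Char)) (h : l.length < fuel) :
    PySem.Chars.splitOn.go ['|'] fuel l cur acc =
      acc.reverse ++
        (match pvSplit l with
          | [] => [cur.reverse]
          | s :: ss => (cur.reverse ++ s) :: ss) := by
  induction fuel generalizing l cur acc with
  | zero => omega
  | succ fuel ih =>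
    cases l with
    | nil => simp [PySem.Chars.splitOn.go, pvSplit]
    | cons c cs =>
      rw [PySem.Chars.splitOn.go]
      by_cases hc : c = '|'
      · subst hc
        have hpre : List.isPrefixOf ['|'] ('|' :: cs) = true := by
          simp [List.isPrefixOf]
        simp only [hpre, if_pos, List.length_cons, List.drop_succ_cons, List.length_nil, List.drop_zero]
        rw [ih cs [] (cur.reverse :: acc)
          (by simp only [List.length_cons] at h; omega)]
        rw [pvSplit_cons_bar]
        cases hs : pvSplit cs with
        | nil => exact absurd hs (pvSplit_ne_nil cs)
        | cons s ss => simp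
      · have hpre : List.isPrefixOf ['|'] (c :: cs) = false := by
          simp only [List.isPrefixOf, Bool.and_eq_false_iff, beq_eq_false_iff_ne, ne_eq]
          exact Or.inl (fun h => hc h.symm)
        simp only [hpre, Bool.false_eq_true, if_false]
        rw [ih cs (c :: cur) acc (by simp only [List.length_cons] at h; omega)]
        simp only [pvSplit, if_neg hc]
        cases hs : pvSplit cs with
        | nil => exact absurd hs (pvSplit_ne_nil cs)
        | cons s ss => simp

theorem splitOn_eq_pvSplit (l : List Char) :
    PySem.Chars.splitOn l ['|'] = pvSplit l := by
  rw [PySem.Chars.splitOn, pvGo_eq (l.length + 1) l [] [] (Nat.lt_succ_self _)]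
  cases hs : pvSplit l with
  | nil => exact absurd hs (pvSplit_ne_nil l)
  | cons s ss => simp

-- A's loop computes pvRep (unconditionally)
theorem pvGoA_eq (al : List Char) (w acc : List Char) :
    pvGoA w acc al = acc ++ pvRep w al := by
  induction al generalizing w acc with
  | nil => simp [pvGoA, pvRep]
  | cons c cs ih =>
    by_cases hc : c = '|'
    · subst hc
      simp only [pvGoA, pvRep, ih]
      simp
    · cases w with
      | nil =>
        simp [pvGoA, hc, pvRep, PySem.List.pyGet?]
      | cons x xs =>
        simp only [pvGoA, if_neg hc, PySem.List.pyGet?_zero_cons,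
          PySem.List.slice_from_one, List.tail_cons, pvRep, ih]
        simp

-- join over '|' of a cons of segments
theorem pvJoin_cons (s : List Char) (ss : List (List Char)) (hss : ss ≠ []) :
    PySem.Chars.join ['|'] (s :: ss) = s ++ '|' :: PySem.Chars.join ['|'] ss := by
  cases ss with
  | nil => exact absurd rfl hss
  | cons t ts => simp [PySem.Chars.join, List.intercalate, List.intersperse]

theorem pvJoin_cons_cons (x : Char) (s : List Char) (t : List (List Char)) :
    PySem.Chars.join ['|'] ((x :: s) :: t) = x :: PySem.Chars.join ['|'] (s :: t) := by
  cases t with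
  | nil => simp [PySem.Chars.join, List.intercalate, List.intersperse]
  | cons a b =>
    rw [pvJoin_cons (x :: s) (a :: b) (by simp), pvJoin_cons s (a :: b) (by simp)]
    simp

theorem pvGoB_cons_ne_nil (w : List Char) (p : Nat) (s : List Char) (ss : List (List Char)) :
    pvGoB w p (s :: ss) ≠ [] := by
  simp [pvGoB]

-- B's segment machinery computes pvRep of the tail of the word, given enough characters
theorem pvGoB_eq (al : List Char) (w0 : List Char) (pos : Nat)
    (h : pos + (al.filter (fun c => c ≠ '|')).length ≤ w0.length) :
    PySem.Chars.join ['|'] (pvGoB w0 pos (pvSplit al)) = pvRep (w0.drop pos) al := by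
  induction al generalizing pos with
  | nil =>
    simp [pvSplit, pvGoB, pvFillSeg, PySem.Chars.join, List.intercalate, pvRep]
  | cons c cs ih =>
    by_cases hc : c = '|'
    · subst hc
      rw [pvSplit_cons_bar]
      have hgo : pvGoB w0 pos ([] :: pvSplit cs) = [] :: pvGoB w0 pos (pvSplit cs) := by
        simp [pvGoB, pvFillSeg]
      rw [hgo]
      have hne : pvGoB w0 pos (pvSplit cs) ≠ [] := by
        cases hs : pvSplit cs with
        | nil => exact absurd hs (pvSplit_ne_nil cs)
        | cons s ss => exact pvGoB_cons_ne_nil _ _ _ _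
      rw [pvJoin_cons [] _ hne, List.nil_append]
      rw [ih pos (by simpa using h)]
      simp [pvRep]
    · have hcnt : (List.filter (fun c => decide (c ≠ '|')) (c :: cs)).length
          = (List.filter (fun c => decide (c ≠ '|')) cs).length + 1 := by
        simp [hc]
      have hpos : pos < w0.length := by rw [hcnt] at h; omega
      have hget : PySem.List.pyGet? w0 (pos : Int) = some w0[pos] := by
        rw [PySem.List.pyGet?_natCast]; simp [List.getElem?_eq_getElem hpos]
      have hdrop : w0.drop pos = w0[pos] :: w0.drop (pos + 1) :=
        List.drop_eq_getElem_cons hpos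
      simp only [pvSplit, if_neg hc]
      cases hs : pvSplit cs with
      | nil => exact absurd hs (pvSplit_ne_nil cs)
      | cons s ss =>
        have hgo : pvGoB w0 pos ((c :: s) :: ss) =
            (w0[pos] :: (pvFillSeg w0 (pos + 1) s).1) ::
              pvGoB w0 (pvFillSeg w0 (pos + 1) s).2 ss := by
          simp only [pvGoB, pvFillSeg, hget]
        rw [hgo, pvJoin_cons_cons]
        have hrec : pvGoB w0 (pos + 1) (pvSplit cs) =
            (pvFillSeg w0 (pos + 1) s).1 :: pvGoB w0 (pvFillSeg w0 (pos + 1) s).2 ss := by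
          rw [hs]; simp [pvGoB]
        have hIH := ih (pos + 1) (by rw [hcnt] at h; omega)
        rw [hrec] at hIH
        rw [hIH, hdrop]
        simp [pvRep, hc]

-- ===== VERDICT (by name: the statement is the Claim_ definition above) =====
theorem transfer_casing_to_aligned_word1_spec : Claim_equal_transfer_casing_to_aligned_word1 := by
  intro word aligned_word _ hpre
  unfold Spec_transfer_casing_to_aligned_word1
  unfold transfer_casing_to_aligned_word1 transfer_casing_to_aligned_word1_alt
  have h0 : 0 + (aligned_word.toList.filter (fun c => c ≠ '|')).length ≤ word.toList.length := by
    unfold Pre_transfer_casing_to_aligned_word1 at hpre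
    simpa using hpre
  rw [splitOn_eq_pvSplit, pvGoA_eq, pvGoB_eq _ _ 0 h0]
  simp
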